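-- pv_equiv track=rewrite | github.com/TeddiKao/FreeChessWeb | backend/move_validation/utils/general.py | get_pawn_attacking_squares
-- ===== SOURCE A (Python) =====
-- import copy
--
-- def get_file(square):
-- 	return int(square) % 8
--
-- def get_pawn_attacking_squares(pawn_square, pawn_color):
-- 	attacking_squares = []
--
-- 	if pawn_color.lower() == "black":
-- 		attacking_squares += [f"{int(pawn_square) - 9}", f"{int(pawn_square) - 7}"]
-- 	else:
-- 		attacking_squares += [f"{int(pawn_square) + 9}", f"{int(pawn_square) + 7}"]
--
-- 	cleaned_attacking_squares = copy.deepcopy(attacking_squares)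
-- 	for attacking_square in attacking_squares:
-- 		if abs(get_file(pawn_square) - get_file(attacking_square)) > 1:
-- 			cleaned_attacking_squares.remove(attacking_square)
--
-- 	return cleaned_attacking_squares
-- ===== SOURCE B (Python) =====
-- def get_pawn_attacking_squares(pawn_square, pawn_color):
--     sq = int(pawn_square)
--     f = sq % 8
--     attacking_squares = []
--     if pawn_color.lower() == "black":
--         if f != 0:
--             attacking_squares.append(f"{sq - 9}")
--         if f != 7:
--             attacking_squares.append(f"{sq - 7}")
--     else:
--         if f != 7:
--             attacking_squares.append(f"{sq + 9}")
--         if f != 0: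
--             attacking_squares.append(f"{sq + 7}")
--     return attacking_squares
-- ===== Notes on version B (the rewrite author's own statement) =====
-- stated objective: simpler
-- what changed: B computes the pawn's file once and appends each diagonal square directly under its edge-file check, replacing A's generate-then-deepcopy-then-filter-with-remove pass.
import Mathlib
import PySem

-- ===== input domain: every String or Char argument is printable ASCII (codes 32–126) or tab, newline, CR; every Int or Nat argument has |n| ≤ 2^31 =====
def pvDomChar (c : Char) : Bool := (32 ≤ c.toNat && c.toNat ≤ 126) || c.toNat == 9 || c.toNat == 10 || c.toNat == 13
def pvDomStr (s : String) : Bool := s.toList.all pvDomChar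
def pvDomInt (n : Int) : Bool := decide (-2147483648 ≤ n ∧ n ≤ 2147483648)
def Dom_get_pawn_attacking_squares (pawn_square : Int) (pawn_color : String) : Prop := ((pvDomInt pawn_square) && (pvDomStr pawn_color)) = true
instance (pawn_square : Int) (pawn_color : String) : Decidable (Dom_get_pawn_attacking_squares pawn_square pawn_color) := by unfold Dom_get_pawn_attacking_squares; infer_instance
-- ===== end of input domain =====

-- B computes the file once and conditionally appends each diagonal directly, instead of A's generate/deepcopy/filter-remove pass; same return value (simpler decomposition, not claimed faster).


-- ===== PORT A =====
-- get_file(square) = int(square) % 8  (Python % floors; divisor 8 > 0)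
def pyGetFile (square : Int) : Int := PySem.Int.mod square 8

-- Transliteration of A. Python formats each candidate square with f"{...}" and the
-- filtering loop re-parses it with int() inside get_file; int(f"{v}") = v exactly for an
-- int v, so the port keeps the integer value v and formats with PySem.Int.toStr where the
-- f-string does (exact). copy.deepcopy of a list of strings is the list itself.
def get_pawn_attacking_squares (pawn_square : Int) (pawn_color : String) : List String :=
  let attacking : List Int :=
    if PySem.Str.lower pawn_color == "black" then
      [pawn_square - 9, pawn_square - 7]
    else
      [pawn_square + 9, pawn_square + 7]
  let cleaned_attacking_squares : List String := attacking.map PySem.Int.toStr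
  attacking.foldl (fun cleaned v =>
    if (pyGetFile pawn_square - pyGetFile v).natAbs > 1 then
      -- list.remove: first occurrence; always present here, so getD is never taken
      (PySem.List.remove? cleaned (PySem.Int.toStr v)).getD cleaned
    else cleaned) cleaned_attacking_squares

-- ===== PORT B =====
def get_pawn_attacking_squares_alt (pawn_square : Int) (pawn_color : String) : List String :=
  let f := PySem.Int.mod pawn_square 8
  if PySem.Str.lower pawn_color == "black" then
    (if f ≠ 0 then [PySem.Int.toStr (pawn_square - 9)] else []) ++
    (if f ≠ 7 then [PySem.Int.toStr (pawn_square - 7)] else [])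
  else
    (if f ≠ 7 then [PySem.Int.toStr (pawn_square + 9)] else []) ++
    (if f ≠ 0 then [PySem.Int.toStr (pawn_square + 7)] else [])

-- ===== PRECONDITION & SPEC =====
def Spec_get_pawn_attacking_squares (pawn_square : Int) (pawn_color : String) (out : List String) : Prop := out = get_pawn_attacking_squares_alt pawn_square pawn_color
instance (pawn_square : Int) (pawn_color : String) (out : List String) : Decidable (Spec_get_pawn_attacking_squares pawn_square pawn_color out) := by unfold Spec_get_pawn_attacking_squares; infer_instance

-- ===== CLAIM (what is proved, stated in full; the proofs are below) =====
def Claim_equal_get_pawn_attacking_squares : Prop := ∀ (pawn_square : Int) (pawn_color : String), Dom_get_pawn_attacking_squares pawn_square pawn_color → Spec_get_pawn_attacking_squares pawn_square pawn_color (get_pawn_attacking_squares pawn_square pawn_color)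

-- ===== LEMMAS AND PROOFS =====

-- ===== VERDICT (by name: the statement is the Claim_ definition above) =====
theorem get_pawn_attacking_squares_spec : Claim_equal_get_pawn_attacking_squares := by
  intro sq color _hdom
  unfold Spec_get_pawn_attacking_squares get_pawn_attacking_squares get_pawn_attacking_squares_alt
  have hmod : ∀ a : Int, PySem.Int.mod a 8 = a % 8 := fun a => PySem.Int.mod_eq_emod_of_pos (by norm_num)
  have h8 : sq % 8 = 0 ∨ (sq % 8 ≠ 0 ∧ sq % 8 ≠ 7) ∨ sq % 8 = 7 := by omega
  by_cases hc : PySem.Str.lower color == "black" <;>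
    simp only [hc, if_true, if_false, Bool.false_eq_true] <;>
    rcases h8 with h | ⟨h1, h2⟩ | h
  · -- black, file 0: sq-9 removed (head), sq-7 kept
    have e1 : (sq - 9) % 8 = 7 := by omega
    have e2 : (sq - 7) % 8 = 1 := by omega
    simp [pyGetFile, h, e1, e2, List.foldl]
  · -- black, middle file: both kept
    have e1 : (sq - 9) % 8 = sq % 8 - 1 := by omega
    have e2 : (sq - 7) % 8 = sq % 8 + 1 := by omega
    have c1 : ¬ ((sq % 8 - (sq - 9) % 8).natAbs > 1) := by omega
    have c2 : ¬ ((sq % 8 - (sq - 7) % 8).natAbs > 1) := by omega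
    simp [pyGetFile, c1, c2, List.foldl, h1, h2]
  · -- black, file 7: sq-7 removed (second element)
    have e1 : (sq - 9) % 8 = 6 := by omega
    have e2 : (sq - 7) % 8 = 0 := by omega
    simp only [pyGetFile, hmod, h, e1, e2, List.foldl, List.map]
    norm_num [PySem.List.remove?]
    by_cases hs : PySem.Int.toStr (sq - 9) = PySem.Int.toStr (sq - 7) <;>
      simp [List.idxOf?, List.findIdx?, List.findIdx?.go, hs]
  · -- white, file 0: sq+7 removed (second element)
    have e1 : (sq + 9) % 8 = 1 := by omega
    have e2 : (sq + 7) % 8 = 7 := by omega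
    simp only [pyGetFile, hmod, h, e1, e2, List.foldl, List.map]
    norm_num [PySem.List.remove?]
    by_cases hs : PySem.Int.toStr (sq + 9) = PySem.Int.toStr (sq + 7) <;>
      simp [List.idxOf?, List.findIdx?, List.findIdx?.go, hs]
  · -- white, middle file: both kept
    have e1 : (sq + 9) % 8 = sq % 8 + 1 := by omega
    have e2 : (sq + 7) % 8 = sq % 8 - 1 := by omega
    have c1 : ¬ ((sq % 8 - (sq + 9) % 8).natAbs > 1) := by omega
    have c2 : ¬ ((sq % 8 - (sq + 7) % 8).natAbs > 1) := by omega
    simp [pyGetFile, c1, c2, List.foldl, h1, h2]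
  · -- white, file 7: sq+9 removed (head)
    have e1 : (sq + 9) % 8 = 0 := by omega
    have e2 : (sq + 7) % 8 = 6 := by omega
    simp [pyGetFile, h, e1, e2, List.foldl]
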